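-- pv_equiv track=rewrite | github.com/datologyai/DatBench | datbench/datasets_scoring/evaluation_utils/mathvision_utils.py | _fix_sqrt
-- ===== SOURCE A (Python) =====
-- def _fix_sqrt(string: str) -> str:
--     if "\\sqrt" not in string:
--         return string
--     splits = string.split("\\sqrt")
--     new_string = splits[0]
--     for split in splits[1:]:
--         if len(split) > 0 and split[0] != "{":
--             a = split[0]
--             new_substr = "\\sqrt{" + a + "}" + split[1:]
--         else:
--             new_substr = "\\sqrt" + split
--         new_string += new_substr
--     return new_string
-- ===== SOURCE B (Python) =====
-- def _fix_sqrt(string: str) -> str: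
--     # One left-to-right scan instead of split/rejoin: copy chars, and after each
--     # "\sqrt" token brace the next character unless it is '{' or another "\sqrt" starts there.
--     out = []
--     i = 0
--     n = len(string)
--     while i < n:
--         if string.startswith("\\sqrt", i):
--             out.append("\\sqrt")
--             i += 5
--             if i < n and string[i] != "{" and not string.startswith("\\sqrt", i):
--                 out.append("{" + string[i] + "}")
--                 i += 1
--         else:
--             out.append(string[i])
--             i += 1
--     return "".join(out)
-- ===== Notes on version B (the rewrite author's own statement) =====
-- stated objective: alternative
-- what changed: Replaced split-on-'\sqrt'/rebuild-and-concatenate with a single left-to-right scan that copies characters and, right after each '\sqrt' token, braces the following character unless it is '{' or another '\sqrt' starts there.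
import Mathlib
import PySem

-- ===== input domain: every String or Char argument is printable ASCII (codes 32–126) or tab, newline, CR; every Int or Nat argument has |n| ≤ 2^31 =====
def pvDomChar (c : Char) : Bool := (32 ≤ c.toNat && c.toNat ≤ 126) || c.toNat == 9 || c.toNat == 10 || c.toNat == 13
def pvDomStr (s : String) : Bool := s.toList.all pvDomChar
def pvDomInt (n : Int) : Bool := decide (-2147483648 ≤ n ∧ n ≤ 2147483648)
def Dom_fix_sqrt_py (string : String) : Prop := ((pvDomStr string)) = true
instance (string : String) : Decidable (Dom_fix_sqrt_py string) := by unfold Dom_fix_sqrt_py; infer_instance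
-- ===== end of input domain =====

-- B is an alternative implementation of the same O(n) task: a single left-to-right
-- character scan instead of A's split-on-"\sqrt"-and-rebuild.

-- ===== PORT A =====
-- A's loop body for one segment after a "\sqrt" ('new_substr')
def pvFixSeg (split : List Char) : List Char :=
  match split with
  | [] => "\\sqrt".toList ++ split
  | a :: _ =>
    if a ≠ '{' then "\\sqrt{".toList ++ [a] ++ "}".toList ++ split.drop 1
    else "\\sqrt".toList ++ split

def fix_sqrt_py (string : String) : String :=
  if PySem.Str.isIn "\\sqrt" string = false then string
  else
    let splits := PySem.Chars.splitOn string.toList "\\sqrt".toList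
    let new_string := (splits.head?).getD []
    String.ofList <| (splits.drop 1).foldl (fun acc split => acc ++ pvFixSeg split) new_string

-- ===== PORT B =====
-- Source B's while loop over the scan index, as structural recursion on the remaining characters
def altGo : List Char → List Char
  | [] => []
  | c :: rest =>
    if "\\sqrt".toList.isPrefixOf (c :: rest) then
      match _h : rest.drop 4 with
      | [] => "\\sqrt".toList
      | d :: tail =>
        if d = '{' ∨ "\\sqrt".toList.isPrefixOf (rest.drop 4) then
          "\\sqrt".toList ++ altGo (rest.drop 4)
        else
          "\\sqrt".toList ++ '{' :: d :: '}' :: altGo tail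
    else c :: altGo rest
termination_by l => l.length
decreasing_by
  · simp [List.length_drop]
  · have := congrArg List.length _h
    simp [List.length_drop] at this
    simp; omega
  · simp

def fix_sqrt_py_alt (string : String) : String := String.ofList (altGo string.toList)

-- ===== PRECONDITION & SPEC =====
def Spec_fix_sqrt_py (string : String) (out : String) : Prop := out = fix_sqrt_py_alt string
instance (string : String) (out : String) : Decidable (Spec_fix_sqrt_py string out) := by unfold Spec_fix_sqrt_py; infer_instance

-- ===== CLAIM (what is proved, stated in full; the proofs are below) =====
def Claim_equal_fix_sqrt_py : Prop := ∀ (string : String), Dom_fix_sqrt_py string → Spec_fix_sqrt_py string (fix_sqrt_py string)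

-- ===== LEMMAS AND PROOFS =====
def splitSpec : List Char → List (List Char)
  | [] => [[]]
  | c :: rest =>
    if "\\sqrt".toList.isPrefixOf (c :: rest) then [] :: splitSpec (rest.drop 4)
    else (splitSpec rest).modifyHead (c :: ·)
termination_by l => l.length
decreasing_by
  · simp [List.length_drop]
  · simp

lemma splitSpec_cons_pos (c : Char) (rest : List Char)
    (hp : "\\sqrt".toList.isPrefixOf (c :: rest) = true) :
    splitSpec (c :: rest) = [] :: splitSpec (rest.drop 4) := by
  rw [splitSpec, if_pos hp]

lemma splitSpec_cons_neg (c : Char) (rest : List Char)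
    (hp : "\\sqrt".toList.isPrefixOf (c :: rest) = false) :
    splitSpec (c :: rest) = (splitSpec rest).modifyHead (c :: ·) := by
  rw [splitSpec, if_neg (fun h => Bool.false_ne_true (hp ▸ h))]

lemma altGo_cons_neg (c : Char) (rest : List Char)
    (hp : "\\sqrt".toList.isPrefixOf (c :: rest) = false) :
    altGo (c :: rest) = c :: altGo rest := by
  rw [altGo, if_neg (fun h => Bool.false_ne_true (hp ▸ h))]

lemma go_step_pos (fuel : Nat) (c : Char) (rest cur : List Char) (accs : List (List Char))
    (hp : "\\sqrt".toList.isPrefixOf (c :: rest) = true) :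
    PySem.Chars.splitOn.go "\\sqrt".toList (fuel+1) (c::rest) cur accs =
      PySem.Chars.splitOn.go "\\sqrt".toList fuel (rest.drop 4) [] (cur.reverse :: accs) := by
  conv_lhs => rw [PySem.Chars.splitOn.go]
  rw [if_pos hp]
  congr 1

lemma go_step_neg (fuel : Nat) (c : Char) (rest cur : List Char) (accs : List (List Char))
    (hp : "\\sqrt".toList.isPrefixOf (c :: rest) = false) :
    PySem.Chars.splitOn.go "\\sqrt".toList (fuel+1) (c::rest) cur accs =
      PySem.Chars.splitOn.go "\\sqrt".toList fuel rest (c :: cur) accs := by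
  conv_lhs => rw [PySem.Chars.splitOn.go]
  rw [if_neg (fun h => Bool.false_ne_true (hp ▸ h))]

lemma go_nil (fuel : Nat) (cur : List Char) (accs : List (List Char)) :
    PySem.Chars.splitOn.go "\\sqrt".toList (fuel+1) [] cur accs = (cur.reverse :: accs).reverse := by
  rw [PySem.Chars.splitOn.go]
  simp

lemma go_zero (l cur : List Char) (accs : List (List Char)) :
    PySem.Chars.splitOn.go "\\sqrt".toList 0 l cur accs = ((cur.reverse ++ l) :: accs).reverse := by
  rw [PySem.Chars.splitOn.go]

lemma modifyHead_modifyHead' {α : Type} (f g : α → α) (l : List α) :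
    (l.modifyHead g).modifyHead f = l.modifyHead (fun x => f (g x)) := by
  cases l <;> simp

lemma splitOn_go_eq (fuel : Nat) (l cur : List Char) (accs : List (List Char))
    (h : l.length ≤ fuel) :
    PySem.Chars.splitOn.go "\\sqrt".toList fuel l cur accs =
      accs.reverse ++ (splitSpec l).modifyHead (cur.reverse ++ ·) := by
  induction fuel generalizing l cur accs with
  | zero =>
    have : l = [] := List.length_eq_zero_iff.mp (Nat.le_zero.mp h)
    subst this
    rw [go_zero, splitSpec]
    simp
  | succ fuel ih =>
    cases l with
    | nil => rw [go_nil, splitSpec]; simp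
    | cons c rest =>
      cases hp : "\\sqrt".toList.isPrefixOf (c :: rest) with
      | true =>
        have hlen : (rest.drop 4).length ≤ fuel := by
          simp [List.length_drop] at h ⊢; omega
        rw [go_step_pos _ _ _ _ _ hp, ih _ _ _ hlen, splitSpec_cons_pos _ _ hp]
        have hm : (splitSpec (rest.drop 4)).modifyHead (([] : List Char).reverse ++ ·) =
            splitSpec (rest.drop 4) := by
          cases splitSpec (rest.drop 4) <;> simp
        rw [hm]
        simp
      | false =>
        rw [go_step_neg _ _ _ _ _ hp, ih _ _ _ (by simp at h ⊢; omega),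
          splitSpec_cons_neg _ _ hp, modifyHead_modifyHead']
        simp

lemma splitOn_eq_splitSpec (l : List Char) :
    PySem.Chars.splitOn l "\\sqrt".toList = splitSpec l := by
  rw [PySem.Chars.splitOn, splitOn_go_eq _ _ _ _ (by omega)]
  cases splitSpec l <;> simp

lemma splitSpec_ne_nil (l : List Char) : splitSpec l ≠ [] := by
  induction l using splitSpec.induct with
  | case1 => rw [splitSpec]; simp
  | case2 c rest hp ih => rw [splitSpec_cons_pos _ _ hp]; simp
  | case3 c rest hp ih =>
    rw [splitSpec_cons_neg _ _ (Bool.eq_false_iff.mpr hp)]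
    cases hE : splitSpec rest with
    | nil => exact absurd hE ih
    | cons a b => simp

def joinA (l : List Char) : List Char :=
  match splitSpec l with
  | [] => []
  | p :: rest => p ++ (rest.map pvFixSeg).flatten

lemma joinA_eq (l h' : List Char) (tl : List (List Char)) (hS : splitSpec l = h' :: tl) :
    joinA l = h' ++ (tl.map pvFixSeg).flatten := by
  simp only [joinA, hS]

lemma splitSpec_nil : splitSpec [] = [[]] := by rw [splitSpec]

lemma altGo_nil : altGo [] = [] := by rw [altGo]

lemma altGo_sep_cons (d : Char) (t : List Char) :
    altGo ("\\sqrt".toList ++ d :: t) =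
      if d = '{' ∨ "\\sqrt".toList.isPrefixOf (d :: t) = true then
        "\\sqrt".toList ++ altGo (d :: t)
      else "\\sqrt".toList ++ '{' :: d :: '}' :: altGo t := by
  show altGo ('\\' :: 's' :: 'q' :: 'r' :: 't' :: d :: t) = _
  rw [altGo, if_pos (by simp [List.isPrefixOf_iff_prefix, List.cons_prefix_cons])]
  simp only [List.drop_succ_cons, List.drop_zero]

lemma altGo_sep_nil : altGo ("\\sqrt".toList ++ []) = "\\sqrt".toList := by
  show altGo ('\\' :: 's' :: 'q' :: 'r' :: 't' :: []) = _
  rw [altGo, if_pos (by simp [List.isPrefixOf_iff_prefix, List.cons_prefix_cons])]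
  simp only [List.drop_succ_cons, List.drop_zero]

lemma main_ind (n : Nat) :
    (∀ l : List Char, l.length ≤ n → altGo l = joinA l) ∧
    (∀ t : List Char, t.length < n →
      altGo ("\\sqrt".toList ++ t) = ((splitSpec t).map pvFixSeg).flatten) := by
  induction n with
  | zero =>
    refine ⟨fun l hl => ?_, fun t ht => absurd ht (by omega)⟩
    have : l = [] := List.length_eq_zero_iff.mp (Nat.le_zero.mp hl)
    subst this
    rw [altGo_nil, joinA_eq [] [] [] splitSpec_nil]
    simp
  | succ n ih =>
    have II : ∀ t : List Char, t.length < n + 1 →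
        altGo ("\\sqrt".toList ++ t) = ((splitSpec t).map pvFixSeg).flatten := by
      intro t ht
      cases t with
      | nil =>
        rw [altGo_sep_nil, splitSpec_nil]
        simp [pvFixSeg]
      | cons d t' =>
        rw [altGo_sep_cons]
        cases hp : "\\sqrt".toList.isPrefixOf (d :: t') with
        | true =>
          obtain ⟨u, hu⟩ := List.isPrefixOf_iff_prefix.mp hp
          have hdu : t' = 's'::'q'::'r'::'t'::u := by
            have := hu.symm
            simp at this
            exact this.2
          have hlen : u.length < n := by
            have := congrArg List.length hu
            simp at this ht
            omega
          rw [if_pos (Or.inr rfl)]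
          rw [show altGo (d :: t') = altGo ("\\sqrt".toList ++ u) by
            rw [← hu]]
          rw [ih.2 u hlen]
          rw [splitSpec_cons_pos _ _ hp]
          have : t'.drop 4 = u := by rw [hdu]; simp
          rw [this]
          simp [pvFixSeg]
        | false =>
          obtain ⟨h', tl, hS⟩ : ∃ h' tl, splitSpec t' = h' :: tl := by
            cases hE : splitSpec t' with
            | nil => exact absurd hE (splitSpec_ne_nil t')
            | cons a b => exact ⟨a, b, rfl⟩
          have hI : altGo t' = h' ++ (tl.map pvFixSeg).flatten := by
            rw [ih.1 t' (by simp at ht; omega), joinA_eq t' h' tl hS]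
          rw [splitSpec_cons_neg _ _ hp, hS]
          by_cases hbr : d = '{'
          · subst hbr
            rw [if_pos (Or.inl rfl)]
            rw [altGo_cons_neg _ _ (by rw [Bool.eq_false_iff]; exact fun hc => absurd (List.isPrefixOf_iff_prefix.mp hc) (by simp [List.cons_prefix_cons]))]
            rw [hI]
            simp [pvFixSeg, List.modifyHead]
          · rw [if_neg (by simp [hbr])]
            rw [ih.1 t' (by simp at ht; omega), joinA_eq t' h' tl hS]
            simp [pvFixSeg, hbr, List.modifyHead]
    refine ⟨?_, II⟩
    intro l hl
    cases l with
    | nil =>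
      rw [altGo_nil, joinA_eq [] [] [] splitSpec_nil]
      simp
    | cons c rest =>
      cases hp : "\\sqrt".toList.isPrefixOf (c :: rest) with
      | true =>
        obtain ⟨u, hu⟩ := List.isPrefixOf_iff_prefix.mp hp
        have hcu : rest = 's'::'q'::'r'::'t'::u := by
          have := hu.symm
          simp at this
          exact this.2
        have hlen : u.length < n + 1 := by
          have := congrArg List.length hu
          simp at this hl
          omega
        rw [show altGo (c :: rest) = altGo ("\\sqrt".toList ++ u) by rw [← hu]]
        rw [II u hlen]
        have hdrop : rest.drop 4 = u := by rw [hcu]; simp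
        rw [joinA_eq (c :: rest) [] (splitSpec u)
          (by rw [splitSpec_cons_pos _ _ hp, hdrop])]
        simp
      | false =>
        obtain ⟨h', tl, hS⟩ : ∃ h' tl, splitSpec rest = h' :: tl := by
          cases hE : splitSpec rest with
          | nil => exact absurd hE (splitSpec_ne_nil rest)
          | cons a b => exact ⟨a, b, rfl⟩
        rw [altGo_cons_neg _ _ hp, ih.1 rest (by simp at hl; omega), joinA_eq rest h' tl hS]
        rw [joinA_eq (c :: rest) (c :: h') tl (by rw [splitSpec_cons_neg _ _ hp, hS]; rfl)]
        simp

lemma altGo_eq_joinA (l : List Char) : altGo l = joinA l :=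
  (main_ind l.length).1 l le_rfl

lemma altGo_of_not_infix (l : List Char) (h : ¬ "\\sqrt".toList <:+: l) : altGo l = l := by
  induction l with
  | nil => exact altGo_nil
  | cons c rest ih =>
    have hp : "\\sqrt".toList.isPrefixOf (c :: rest) = false := by
      rw [Bool.eq_false_iff]
      intro htrue
      exact h (List.isPrefixOf_iff_prefix.mp htrue).isInfix
    rw [altGo_cons_neg _ _ hp]
    rw [ih (fun hi => h (hi.trans (rest.suffix_cons c).isInfix))]


-- ===== VERDICT (by name: the statement is the Claim_ definition above) =====
theorem fix_sqrt_py_spec : Claim_equal_fix_sqrt_py := by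
  intro s _
  unfold Spec_fix_sqrt_py
  unfold fix_sqrt_py fix_sqrt_py_alt
  by_cases h : PySem.Str.isIn "\\sqrt" s = false
  · rw [if_pos h]
    rw [altGo_of_not_infix _ (by
      intro hi
      rw [Bool.eq_false_iff] at h
      exact h (by simp [PySem.Str.isIn, PySem.Chars.isIn_iff_infix]; exact hi))]
    simp
  · rw [if_neg h]
    simp only [splitOn_eq_splitSpec, PySem.List.foldl_append_eq_flatMap]
    obtain ⟨h', tl, hS⟩ : ∃ h' tl, splitSpec s.toList = h' :: tl := by
      cases hE : splitSpec s.toList with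
      | nil => exact absurd hE (splitSpec_ne_nil _)
      | cons a b => exact ⟨a, b, rfl⟩
    rw [altGo_eq_joinA, joinA_eq _ h' tl hS, hS]
    simp [List.flatMap_def]
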